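-- pv_equiv track=rewrite | github.com/PCMDI/pcmdi_metrics | pcmdi_metrics/enso/lib/summary_plot_lib/plot.py | find_first_member
-- ===== SOURCE A (Python) =====
-- from copy import deepcopy
--
-- def find_first_member(members, mod=None):
--     """
--     Finds the first member
--
--     Inputs:
--     ------
--     :param members: list of string
--         List of members.
--
--     Output:
--     ------
--     :return mem: string
--         First member of the given list.
--     """
--     if "r1i1p1" in members:
--         mem = "r1i1p1"
--     elif "r1i1p1f1" in members:
--         mem = "r1i1p1f1"
--     elif "r1i1p1f2" in members:
--         mem = "r1i1p1f2"
--     else: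
--         tmp = deepcopy(members)
--         members = list()
--         for mem in tmp:
--             for ii in range(1, 10):
--                 if "r" + str(ii) + "i" in mem:
--                     members.append(
--                         mem.replace("r" + str(ii) + "i", "r" + str(ii).zfill(2) + "i")
--                     )
--                 else:
--                     members.append(mem)
--         del tmp
--         mem = sorted(list(set(members)), key=lambda v: v.upper())[0].replace("r0", "r")
--     # special case
--     if mod == "NorESM2-LM":
--         mem = "r2i1p1f1"
--     return mem
-- ===== SOURCE B (Python) =====
-- def find_first_member(members, mod=None):
--     if "r1i1p1" in members:
--         mem = "r1i1p1"
--     elif "r1i1p1f1" in members: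
--         mem = "r1i1p1f1"
--     elif "r1i1p1f2" in members:
--         mem = "r1i1p1f2"
--     else:
--         # single pass: running minimum (by uppercase key) over the normalized
--         # candidates, instead of materializing 9 copies per member, deduping,
--         # sorting and indexing
--         best = None
--         best_key = None
--         for m in members:
--             for ii in range(1, 10):
--                 pat = "r" + str(ii) + "i"
--                 cand = m.replace(pat, "r0" + str(ii) + "i") if pat in m else m
--                 k = cand.upper()
--                 if best is None or k < best_key:
--                     best, best_key = cand, k
--         mem = best.replace("r0", "r")
--     if mod == "NorESM2-LM":
--         mem = "r2i1p1f1"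
--     return mem
-- ===== Notes on version B (the rewrite author's own statement) =====
-- stated objective: simpler
-- what changed: Instead of materializing 9 normalized copies per member into a list, deduplicating through a set and sorting by uppercase key to take element [0], B keeps a single running minimum (by uppercase key) over the same normalized candidates in one pass and never builds, dedups or sorts an intermediate list.
-- outside the precondition, e.g. on find_first_member(['a', 'A'], None): A returns 'a', B returns 'a'
import Mathlib
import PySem

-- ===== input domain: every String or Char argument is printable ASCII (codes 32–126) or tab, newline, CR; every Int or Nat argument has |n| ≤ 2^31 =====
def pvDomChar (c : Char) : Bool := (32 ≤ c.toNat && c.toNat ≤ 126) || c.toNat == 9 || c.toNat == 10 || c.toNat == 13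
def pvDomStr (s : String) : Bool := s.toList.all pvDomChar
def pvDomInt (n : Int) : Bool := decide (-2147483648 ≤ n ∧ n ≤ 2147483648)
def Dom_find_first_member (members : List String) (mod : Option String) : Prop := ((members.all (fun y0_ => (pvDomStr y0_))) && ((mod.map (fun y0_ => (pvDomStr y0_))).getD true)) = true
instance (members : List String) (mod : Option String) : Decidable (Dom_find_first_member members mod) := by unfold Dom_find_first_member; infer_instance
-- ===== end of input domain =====

-- B replaces A's 9-copies-per-member list + set-dedup + sort-by-upper + [0] with a single
-- running minimum (by uppercase key) over the same normalized candidates; objective: simpler.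


-- ===== PORT A =====
def find_first_member (members : List String) (mod : Option String) : String :=
  let mem :=
    if members.contains "r1i1p1" then "r1i1p1"
    else if members.contains "r1i1p1f1" then "r1i1p1f1"
    else if members.contains "r1i1p1f2" then "r1i1p1f2"
    else
      let tmp := members                               -- tmp = deepcopy(members)
      let members' : List String := tmp.foldl (fun acc mem =>
        (PySem.List.pyRange 1 10 1).foldl (fun acc ii =>
          if PySem.Str.isIn ("r" ++ PySem.Int.toStr ii ++ "i") mem then
            acc ++ [PySem.Str.replace mem ("r" ++ PySem.Int.toStr ii ++ "i")
                      ("r" ++ PySem.Str.zfill (PySem.Int.toStr ii) 2 ++ "i")]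
          else acc ++ [mem]) acc) []
      match PySem.List.pyGet?
          (PySem.List.sorted (PySem.Set.ofList members') (fun v => PySem.Str.upper v) false) 0 with
      | some s => PySem.Str.replace s "r0" "r"
      | none => ""                                     -- Python raises IndexError here (members = []); outside Pre_
  if mod == some "NorESM2-LM" then "r2i1p1f1" else mem

-- ===== PORT B =====
def find_first_member_alt (members : List String) (mod : Option String) : String :=
  let mem :=
    if members.contains "r1i1p1" then "r1i1p1"
    else if members.contains "r1i1p1f1" then "r1i1p1f1"
    else if members.contains "r1i1p1f2" then "r1i1p1f2"
    else
      let best : Option (String × String) := members.foldl (fun best m =>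
        (PySem.List.pyRange 1 10 1).foldl (fun best ii =>
          let pat := "r" ++ PySem.Int.toStr ii ++ "i"
          let cand := if PySem.Str.isIn pat m then
              PySem.Str.replace m pat ("r0" ++ PySem.Int.toStr ii ++ "i") else m
          let k := PySem.Str.upper cand
          match best with
          | none => some (cand, k)
          | some (b, bk) => if k < bk then some (cand, k) else some (b, bk)) best) none
      match best with
      | some (b, _) => PySem.Str.replace b "r0" "r"
      | none => ""                                     -- Python raises AttributeError here (members = []); outside Pre_
  if mod == some "NorESM2-LM" then "r2i1p1f1" else mem

-- ===== PRECONDITION & SPEC =====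
-- the per-member normalized candidates A and B both range over (used only by Pre_ and the proofs)
def pvCand (m : String) (ii : Int) : String :=
  if PySem.Str.isIn ("r" ++ PySem.Int.toStr ii ++ "i") m then
    PySem.Str.replace m ("r" ++ PySem.Int.toStr ii ++ "i") ("r0" ++ PySem.Int.toStr ii ++ "i")
  else m
def pvCands (members : List String) : List String :=
  members.flatMap (fun m => (PySem.List.pyRange 1 10 1).map (pvCand m))
-- Pre_ excludes (a) empty member lists, on which A raises IndexError at sorted([])[0], and
-- (b) inputs where none of the three guard strings is present and two DISTINCT normalized
-- candidates share an uppercase key: there A's answer is the accidental iteration order of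
-- a Python set of strings (it varies with the interpreter's hash seed), so no single value
-- can be claimed.
def Pre_find_first_member (members : List String) (mod : Option String) : Prop :=
  members ≠ [] ∧
  ("r1i1p1" ∈ members ∨ "r1i1p1f1" ∈ members ∨ "r1i1p1f2" ∈ members ∨
    (pvCands members).Pairwise (fun a b => a = b ∨ PySem.Str.upper a ≠ PySem.Str.upper b))
instance (members : List String) (mod : Option String) : Decidable (Pre_find_first_member members mod) := by
  unfold Pre_find_first_member; infer_instance
def pvWitness_find_first_member : List String × Option String := (["r2i1p1", "r10i1p1"], some "x")
def Spec_find_first_member (members : List String) (mod : Option String) (out : String) : Prop := out = find_first_member_alt members mod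
instance (members : List String) (mod : Option String) (out : String) : Decidable (Spec_find_first_member members mod out) := by unfold Spec_find_first_member; infer_instance

-- ===== CLAIM (what is proved, stated in full; the proofs are below) =====
def Claim_equal_find_first_member : Prop := ∀ (members : List String) (mod : Option String), Dom_find_first_member members mod → Pre_find_first_member members mod → Spec_find_first_member members mod (find_first_member members mod)

-- ===== LEMMAS AND PROOFS =====

-- the running-minimum step of port B, over a candidate string
def pvStep (best : Option (String × String)) (c : String) : Option (String × String) :=
  match best with
  | none => some (c, PySem.Str.upper c)
  | some (b, bk) => if PySem.Str.upper c < bk then some (c, PySem.Str.upper c) else some (b, bk)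

-- zfill form of the normalized candidate, as port A spells it
def pvCandZ (m : String) (ii : Int) : String :=
  if PySem.Str.isIn ("r" ++ PySem.Int.toStr ii ++ "i") m then
    PySem.Str.replace m ("r" ++ PySem.Int.toStr ii ++ "i")
      ("r" ++ PySem.Str.zfill (PySem.Int.toStr ii) 2 ++ "i")
  else m

theorem pvZf1 : ("r" ++ PySem.Str.zfill (PySem.Int.toStr 1) 2 ++ "i") = ("r0" ++ PySem.Int.toStr 1 ++ "i") := by decide
theorem pvZf2 : ("r" ++ PySem.Str.zfill (PySem.Int.toStr 2) 2 ++ "i") = ("r0" ++ PySem.Int.toStr 2 ++ "i") := by decide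
theorem pvZf3 : ("r" ++ PySem.Str.zfill (PySem.Int.toStr 3) 2 ++ "i") = ("r0" ++ PySem.Int.toStr 3 ++ "i") := by decide
theorem pvZf4 : ("r" ++ PySem.Str.zfill (PySem.Int.toStr 4) 2 ++ "i") = ("r0" ++ PySem.Int.toStr 4 ++ "i") := by decide
theorem pvZf5 : ("r" ++ PySem.Str.zfill (PySem.Int.toStr 5) 2 ++ "i") = ("r0" ++ PySem.Int.toStr 5 ++ "i") := by decide
theorem pvZf6 : ("r" ++ PySem.Str.zfill (PySem.Int.toStr 6) 2 ++ "i") = ("r0" ++ PySem.Int.toStr 6 ++ "i") := by decide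
theorem pvZf7 : ("r" ++ PySem.Str.zfill (PySem.Int.toStr 7) 2 ++ "i") = ("r0" ++ PySem.Int.toStr 7 ++ "i") := by decide
theorem pvZf8 : ("r" ++ PySem.Str.zfill (PySem.Int.toStr 8) 2 ++ "i") = ("r0" ++ PySem.Int.toStr 8 ++ "i") := by decide
theorem pvZf9 : ("r" ++ PySem.Str.zfill (PySem.Int.toStr 9) 2 ++ "i") = ("r0" ++ PySem.Int.toStr 9 ++ "i") := by decide

-- on ii = 1..9, zfill(str(ii), 2) = "0" + str(ii), so the two spellings agree
theorem pvCandZ_eq (m : String) : ∀ ii ∈ PySem.List.pyRange 1 10 1, pvCandZ m ii = pvCand m ii := by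
  intro ii hmem
  have : ii = 1 ∨ ii = 2 ∨ ii = 3 ∨ ii = 4 ∨ ii = 5 ∨ ii = 6 ∨ ii = 7 ∨ ii = 8 ∨ ii = 9 := by
    have h := PySem.List.mem_pyRange_one.mp hmem
    omega
  rcases this with h | h | h | h | h | h | h | h | h <;> subst h <;>
    simp only [pvCandZ, pvCand, pvZf1, pvZf2, pvZf3, pvZf4, pvZf5, pvZf6, pvZf7, pvZf8, pvZf9]

-- A's inner loop over ii appends exactly the nine pvCand m ii
theorem pvInnerA (m : String) (acc : List String) :
    (PySem.List.pyRange 1 10 1).foldl (fun acc ii =>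
      if PySem.Str.isIn ("r" ++ PySem.Int.toStr ii ++ "i") m then
        acc ++ [PySem.Str.replace m ("r" ++ PySem.Int.toStr ii ++ "i")
                  ("r" ++ PySem.Str.zfill (PySem.Int.toStr ii) 2 ++ "i")]
      else acc ++ [m]) acc
      = acc ++ (PySem.List.pyRange 1 10 1).map (pvCand m) := by
  have hb : (fun (acc : List String) (ii : Int) =>
      if PySem.Str.isIn ("r" ++ PySem.Int.toStr ii ++ "i") m then
        acc ++ [PySem.Str.replace m ("r" ++ PySem.Int.toStr ii ++ "i")
                  ("r" ++ PySem.Str.zfill (PySem.Int.toStr ii) 2 ++ "i")]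
      else acc ++ [m]) = fun acc ii => acc ++ [pvCandZ m ii] := by
    funext acc ii
    simp only [pvCandZ]
    split <;> rfl
  rw [hb, PySem.List.foldl_append_singleton_eq_map]
  exact congrArg (fun l => acc ++ l) (List.map_congr_left (pvCandZ_eq m))

-- A's whole normalization loop builds pvCands
theorem pvBuildA (members : List String) :
    members.foldl (fun acc mem =>
      (PySem.List.pyRange 1 10 1).foldl (fun acc ii =>
        if PySem.Str.isIn ("r" ++ PySem.Int.toStr ii ++ "i") mem then
          acc ++ [PySem.Str.replace mem ("r" ++ PySem.Int.toStr ii ++ "i")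
                    ("r" ++ PySem.Str.zfill (PySem.Int.toStr ii) 2 ++ "i")]
        else acc ++ [mem]) acc) []
      = pvCands members := by
  have h : ∀ (l : List String) (acc : List String),
      l.foldl (fun acc mem =>
        (PySem.List.pyRange 1 10 1).foldl (fun acc ii =>
          if PySem.Str.isIn ("r" ++ PySem.Int.toStr ii ++ "i") mem then
            acc ++ [PySem.Str.replace mem ("r" ++ PySem.Int.toStr ii ++ "i")
                      ("r" ++ PySem.Str.zfill (PySem.Int.toStr ii) 2 ++ "i")]
          else acc ++ [mem]) acc) acc = acc ++ pvCands l := by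
    intro l
    induction l with
    | nil => intro acc; simp [pvCands]
    | cons m t ih =>
      intro acc
      simp only [List.foldl, pvCands, List.flatMap_cons]
      rw [pvInnerA, ih]
      simp [pvCands, List.append_assoc]
  simpa using h members []

-- B's nested loops fold pvStep over pvCands
theorem pvBuildB (members : List String) (init : Option (String × String)) :
    members.foldl (fun best m =>
      (PySem.List.pyRange 1 10 1).foldl (fun best ii =>
        let pat := "r" ++ PySem.Int.toStr ii ++ "i"
        let cand := if PySem.Str.isIn pat m then
            PySem.Str.replace m pat ("r0" ++ PySem.Int.toStr ii ++ "i") else m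
        let k := PySem.Str.upper cand
        match best with
        | none => some (cand, k)
        | some (b, bk) => if k < bk then some (cand, k) else some (b, bk)) best) init
      = (pvCands members).foldl pvStep init := by
  induction members generalizing init with
  | nil => simp [pvCands]
  | cons m t ih =>
    simp only [List.foldl, pvCands, List.flatMap_cons, List.foldl_append]
    rw [ih]
    congr 1

-- running-minimum invariant, started from a recorded element
theorem pvFoldMinSome (L : List String) : ∀ (b : String),
    ∃ c, L.foldl pvStep (some (b, PySem.Str.upper b)) = some (c, PySem.Str.upper c) ∧
      (c = b ∨ c ∈ L) ∧ PySem.Str.upper c ≤ PySem.Str.upper b ∧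
      ∀ y ∈ L, PySem.Str.upper c ≤ PySem.Str.upper y := by
  induction L with
  | nil => intro b; exact ⟨b, rfl, Or.inl rfl, le_refl _, by simp⟩
  | cons x t ih =>
    intro b
    by_cases h : PySem.Str.upper x < PySem.Str.upper b
    · obtain ⟨c, hc, hmem, hle, hall⟩ := ih x
      refine ⟨c, ?_, ?_, ?_, ?_⟩
      · simpa [pvStep, h] using hc
      · rcases hmem with h' | h' <;> simp [h']
      · exact le_trans hle (le_of_lt h)
      · intro y hy
        rcases List.mem_cons.mp hy with h' | h'
        · exact h' ▸ hle
        · exact hall y h'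
    · obtain ⟨c, hc, hmem, hle, hall⟩ := ih b
      refine ⟨c, ?_, ?_, hle, ?_⟩
      · simpa [pvStep, h] using hc
      · rcases hmem with h' | h' <;> simp [h']
      · intro y hy
        rcases List.mem_cons.mp hy with h' | h'
        · exact h' ▸ le_trans hle (not_lt.mp h)
        · exact hall y h'

theorem pvFoldMinNone (L : List String) (h : L ≠ []) :
    ∃ c, L.foldl pvStep none = some (c, PySem.Str.upper c) ∧ c ∈ L ∧
      ∀ y ∈ L, PySem.Str.upper c ≤ PySem.Str.upper y := by
  match L, h with
  | x :: t, _ =>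
    obtain ⟨c, hc, hmem, hle, hall⟩ := pvFoldMinSome t x
    refine ⟨c, ?_, ?_, ?_⟩
    · simpa [pvStep] using hc
    · rcases hmem with h' | h' <;> simp [h']
    · intro y hy
      rcases List.mem_cons.mp hy with h' | h'
      · exact h' ▸ hle
      · exact hall y h'

-- A's sorted-set head: an element of L whose uppercase key is minimal over L
theorem pvSortedHead (L : List String) (h : L ≠ []) :
    ∃ s t, PySem.List.sorted (PySem.Set.ofList L) (fun v => PySem.Str.upper v) false = s :: t ∧
      s ∈ L ∧ ∀ y ∈ L, PySem.Str.upper s ≤ PySem.Str.upper y := by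
  obtain ⟨x, hx⟩ := List.exists_mem_of_ne_nil L h
  have hset : PySem.Set.ofList L ≠ [] := by
    intro hnil
    have := (PySem.Set.mem_ofList L x).mpr hx
    simp [hnil] at this
  have hs : PySem.List.sorted (PySem.Set.ofList L) (fun v => PySem.Str.upper v) false ≠ [] := by
    intro hnil
    exact hset ((PySem.List.sorted_eq_nil_iff _ _ _).mp hnil)
  match hsort : PySem.List.sorted (PySem.Set.ofList L) (fun v => PySem.Str.upper v) false, hs with
  | s :: t, _ =>
    refine ⟨s, t, rfl, ?_, ?_⟩
    · have : s ∈ PySem.List.sorted (PySem.Set.ofList L) (fun v => PySem.Str.upper v) false := by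
        rw [hsort]; exact List.mem_cons_self
      exact (PySem.Set.mem_ofList L s).mp ((PySem.List.mem_sorted _ _ _ s).mp this)
    · intro y hy
      exact PySem.List.key_head_sorted_le _ _ hsort y ((PySem.Set.mem_ofList L y).mpr hy)

-- under the tie-freeness of Pre_, minimal-key elements of pvCands are unique
theorem pvUnique (L : List String)
    (hp : L.Pairwise (fun a b => a = b ∨ PySem.Str.upper a ≠ PySem.Str.upper b))
    {a b : String} (ha : a ∈ L) (hb : b ∈ L)
    (hk : PySem.Str.upper a = PySem.Str.upper b) : a = b := by
  by_cases hab : a = b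
  · exact hab
  · have hsym : Symmetric (fun a b : String => a = b ∨ PySem.Str.upper a ≠ PySem.Str.upper b) := by
      intro u v h
      rcases h with h | h
      · exact Or.inl h.symm
      · exact Or.inr (fun e => h e.symm)
    rcases List.Pairwise.forall hsym hp ha hb hab with h | h
    · exact h
    · exact absurd hk h

theorem pvCands_ne_nil (members : List String) (h : members ≠ []) : pvCands members ≠ [] := by
  match members, h with
  | m :: t, _ =>
    intro hnil
    have hlen := congrArg List.length hnil
    simp [pvCands, List.flatMap_cons, PySem.List.length_pyRange_one] at hlen

-- ===== VERDICT (by name: the statement is the Claim_ definition above) =====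
theorem find_first_member_spec : Claim_equal_find_first_member := by
  intro members mod _ hpre
  unfold Spec_find_first_member find_first_member find_first_member_alt
  obtain ⟨hne, hcase⟩ := hpre
  by_cases hm : mod = some "NorESM2-LM"
  · simp [hm]
  have bm : (mod == some "NorESM2-LM") = false := by simpa using hm
  simp only [bm, Bool.false_eq_true, if_false]
  by_cases h1 : "r1i1p1" ∈ members
  · simp [h1]
  by_cases h2 : "r1i1p1f1" ∈ members
  · simp [h1, h2]
  by_cases h3 : "r1i1p1f2" ∈ members
  · simp [h1, h2, h3]
  -- else branch: tie-freeness must be the live disjunct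
  have hp : (pvCands members).Pairwise (fun a b => a = b ∨ PySem.Str.upper a ≠ PySem.Str.upper b) := by
    rcases hcase with h | h | h | h
    · exact absurd h h1
    · exact absurd h h2
    · exact absurd h h3
    · exact h
  have b1 : members.contains "r1i1p1" = false := by simpa using h1
  have b2 : members.contains "r1i1p1f1" = false := by simpa using h2
  have b3 : members.contains "r1i1p1f2" = false := by simpa using h3
  simp only [b1, b2, b3, Bool.false_eq_true, if_false]
  rw [pvBuildA, pvBuildB]
  have hLne := pvCands_ne_nil members hne
  obtain ⟨s, t, hsort, hsmem, hsmin⟩ := pvSortedHead (pvCands members) hLne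
  obtain ⟨c, hc, hcmem, hcmin⟩ := pvFoldMinNone (pvCands members) hLne
  have hkey : PySem.Str.upper s = PySem.Str.upper c :=
    le_antisymm (hsmin c hcmem) (hcmin s hsmem)
  have hsc : s = c := pvUnique (pvCands members) hp hsmem hcmem hkey
  rw [hsort, hc, hsc]
  simp [PySem.List.pyGet?, PySem.List.pyIdx?]
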